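-- pv_equiv track=rewrite | github.com/Nicoezg/TDA-Buchwald-2024-2C | Parciales/2024-c0-0.py | es_subset_sum
-- ===== SOURCE A (Python) =====
-- def es_subset_sum(conjunto, solucion, K):
--     # Nos aseguramos que el conjunto solución sume K exactamente
--     if sum(solucion) != K:
--         return False
--     visitados = dict()
--     # Armamos un diccionario con el numero de apariciones de cada valor en el conjunto
--     for valor in conjunto:
--         visitados[valor] = visitados.get(valor, 0) + 1
--
--     # Recorremos los valores en la solución, si no son parte del conjunto, no es una solución válida.
--     # Si algún elemento aparece más veces de las que aparece en el conjunto original, tampoco es solución válida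
--     for valor in solucion:
--         if not valor in conjunto:
--             return False
--         visitados[valor] = visitados.get(valor, 0) - 1
--         if visitados[valor] < 0:
--             return False
--     return True
-- ===== SOURCE B (Python) =====
-- def es_subset_sum(conjunto, solucion, K):
--     if sum(solucion) != K:
--         return False
--     cs = sorted(conjunto)
--     ss = sorted(solucion)
--     i = 0
--     for x in ss:
--         while i < len(cs) and cs[i] < x:
--             i += 1
--         if i == len(cs) or cs[i] != x:
--             return False
--         i += 1
--     return True
-- ===== Notes on version B (the rewrite author's own statement) =====
-- stated objective: alternative
-- what changed: Replaces A's occurrence-dict build plus per-element membership-and-decrement scan by sorting both lists and running a single two-pointer merge scan that checks the sorted solucion embeds in the sorted conjunto.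
import Mathlib
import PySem

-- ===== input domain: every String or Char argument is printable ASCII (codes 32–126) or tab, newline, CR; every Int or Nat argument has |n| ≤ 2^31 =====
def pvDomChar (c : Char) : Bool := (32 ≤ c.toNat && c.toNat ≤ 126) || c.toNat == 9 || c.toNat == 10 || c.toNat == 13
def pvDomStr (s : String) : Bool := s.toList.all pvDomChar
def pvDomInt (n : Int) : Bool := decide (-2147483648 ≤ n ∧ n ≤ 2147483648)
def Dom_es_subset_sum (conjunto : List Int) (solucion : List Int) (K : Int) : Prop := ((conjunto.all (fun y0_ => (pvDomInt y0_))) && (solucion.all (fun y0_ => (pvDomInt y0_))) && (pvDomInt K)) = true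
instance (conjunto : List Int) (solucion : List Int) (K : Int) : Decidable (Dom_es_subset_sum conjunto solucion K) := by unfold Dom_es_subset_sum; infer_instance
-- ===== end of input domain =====

-- B replaces A's dict-and-decrement scan by sorting both lists and a two-pointer merge scan (alternative algorithm; same result).

-- ===== PORT A =====
-- the second 'for valor in solucion' loop of A, carrying the visitados dict
def esLoop (conjunto : List Int) : List Int → PySem.Dict Int Int → Bool
  | [], _ => true
  | v :: rest, d =>
    if ¬ (v ∈ conjunto) then false
    else
      let d' := d.insert v (d.getD v 0 - 1)
      if d'.getD v 0 < 0 then false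
      else esLoop conjunto rest d'

def es_subset_sum (conjunto : List Int) (solucion : List Int) (K : Int) : Bool :=
  if solucion.sum ≠ K then false
  else
    esLoop conjunto solucion
      (conjunto.foldl (fun d v => d.insert v (d.getD v 0 + 1)) PySem.Dict.empty)

-- ===== PORT B =====
-- the inner 'while i < len(cs) and cs[i] < x: i += 1' loop
def skipLt (cs : List Int) (x : Int) (i : Nat) : Nat :=
  if h : i < cs.length then
    if cs[i] < x then skipLt cs x (i + 1) else i
  else i
termination_by cs.length - i

-- the 'for x in ss' loop carrying the cursor i into cs
def bLoop (cs : List Int) : List Int → Nat → Bool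
  | [], _ => true
  | x :: rest, i =>
    let j := skipLt cs x i
    if j = cs.length ∨ cs.getD j 0 ≠ x then false
    else bLoop cs rest (j + 1)

def es_subset_sum_alt (conjunto : List Int) (solucion : List Int) (K : Int) : Bool :=
  if solucion.sum ≠ K then false
  else
    bLoop (PySem.List.sorted conjunto (fun x => x) false)
      (PySem.List.sorted solucion (fun x => x) false) 0

-- ===== PRECONDITION & SPEC =====
def Spec_es_subset_sum (conjunto : List Int) (solucion : List Int) (K : Int) (out : Bool) : Prop := out = es_subset_sum_alt conjunto solucion K
instance (conjunto : List Int) (solucion : List Int) (K : Int) (out : Bool) : Decidable (Spec_es_subset_sum conjunto solucion K out) := by unfold Spec_es_subset_sum; infer_instance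

-- ===== CLAIM (what is proved, stated in full; the proofs are below) =====
def Claim_equal_es_subset_sum : Prop := ∀ (conjunto : List Int) (solucion : List Int) (K : Int), Dom_es_subset_sum conjunto solucion K → Spec_es_subset_sum conjunto solucion K (es_subset_sum conjunto solucion K)

-- ===== LEMMAS AND PROOFS =====

-- A's decrement loop succeeds iff every value of the remaining solución is in conjunto and
-- its multiplicity in the remaining solución fits inside the current dict budget.
theorem esLoop_eq_true_iff (conjunto : List Int) (sol : List Int) (d : PySem.Dict Int Int) :
    esLoop conjunto sol d = true ↔
      ∀ v ∈ sol, v ∈ conjunto ∧ (sol.count v : Int) ≤ d.getD v 0 := by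
  induction sol generalizing d with
  | nil => simp [esLoop]
  | cons x rest ih =>
    by_cases hm : x ∈ conjunto
    · rw [esLoop]
      rw [if_neg (by simpa using hm)]
      simp only [PySem.Dict.getD_insert_self]
      by_cases hneg : d.getD x 0 - 1 < 0
      · rw [if_pos hneg]
        simp only [Bool.false_eq_true, false_iff, not_forall]
        refine ⟨x, List.mem_cons_self, ?_⟩
        rintro ⟨-, h2⟩
        rw [List.count_cons_self] at h2
        push_cast at h2
        omega
      · rw [if_neg hneg, ih]
        constructor
        · intro h v hv
          rcases List.mem_cons.mp hv with heq | hv'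
          · subst heq
            refine ⟨hm, ?_⟩
            rw [List.count_cons_self]
            by_cases hvr : v ∈ rest
            · have h2 := (h v hvr).2
              rw [PySem.Dict.getD_insert_self] at h2
              push_cast; omega
            · rw [List.count_eq_zero_of_not_mem hvr]
              push_cast; omega
          · by_cases hvx : v = x
            · subst hvx
              refine ⟨hm, ?_⟩
              have h2 := (h v hv').2
              rw [PySem.Dict.getD_insert_self] at h2
              rw [List.count_cons_self]; push_cast at h2 ⊢; omega
            · have h2 := h v hv'
              rw [PySem.Dict.getD_insert_of_ne d _ _ hvx] at h2
              rw [List.count_cons_of_ne (Ne.symm hvx)]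
              exact h2
        · intro h v hv
          by_cases hvx : v = x
          · subst hvx
            rw [PySem.Dict.getD_insert_self]
            have h2 := (h v List.mem_cons_self).2
            rw [List.count_cons_self] at h2
            refine ⟨hm, ?_⟩
            push_cast at h2 ⊢; omega
          · rw [PySem.Dict.getD_insert_of_ne d _ _ hvx]
            have h2 := h v (List.mem_cons_of_mem x hv)
            rw [List.count_cons_of_ne (Ne.symm hvx)] at h2
            exact h2
    · rw [esLoop, if_pos (by simpa using hm)]
      constructor
      · intro h; simp at h
      · intro h; exact absurd (h x List.mem_cons_self).1 hm

-- a structural restatement of B's merge scan, on the suffix of cs from the cursor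
def incl : List Int → List Int → Bool
  | [], _ => true
  | _ :: _, [] => false
  | x :: ss, c :: cs => if c < x then incl (x :: ss) cs else if c = x then incl ss cs else false

theorem skipLt_of_lt (cs : List Int) (x : Int) (i : Nat) (h : i < cs.length) (hlt : cs[i] < x) :
    skipLt cs x i = skipLt cs x (i + 1) := by
  rw [skipLt, dif_pos h, if_pos hlt]

theorem skipLt_of_not_lt (cs : List Int) (x : Int) (i : Nat) (h : i < cs.length) (hlt : ¬ cs[i] < x) :
    skipLt cs x i = i := by
  rw [skipLt, dif_pos h, if_neg hlt]

theorem skipLt_of_ge (cs : List Int) (x : Int) (i : Nat) (h : ¬ i < cs.length) :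
    skipLt cs x i = i := by
  rw [skipLt, dif_neg h]

-- bLoop on cursor i computes incl on the suffix cs.drop i
theorem bLoop_eq_incl (cs : List Int) (ss : List Int) (i : Nat) (hi : i ≤ cs.length) :
    bLoop cs ss i = incl ss (cs.drop i) := by
  induction hn : (cs.length - i) + ss.length using Nat.strong_induction_on generalizing ss i with
  | _ n ih =>
    cases ss with
    | nil => simp [bLoop, incl]
    | cons x rest =>
      by_cases h : i < cs.length
      · have hdrop : cs.drop i = cs[i] :: cs.drop (i + 1) := List.drop_eq_getElem_cons h
        by_cases hlt : cs[i] < x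
        · rw [show bLoop cs (x :: rest) i = bLoop cs (x :: rest) (i + 1) by
            simp only [bLoop, skipLt_of_lt cs x i h hlt]]
          rw [hdrop, incl, if_pos hlt]
          exact ih ((cs.length - (i+1)) + (x :: rest).length) (by omega) (x :: rest) (i+1) (by omega) rfl
        · rw [hdrop, incl, if_neg hlt]
          have hskip := skipLt_of_not_lt cs x i h hlt
          by_cases heq : cs[i] = x
          · rw [if_pos heq]
            rw [show bLoop cs (x :: rest) i = bLoop cs rest (i + 1) by
              rw [bLoop]
              simp only [hskip]
              rw [if_neg]
              push Not
              exact ⟨by omega, by rw [List.getD_eq_getElem cs 0 h]; simpa using heq⟩]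
            exact ih ((cs.length - (i+1)) + rest.length) (by simp at hn; omega) rest (i+1) (by omega) rfl
          · rw [if_neg heq]
            rw [bLoop]
            simp only [hskip]
            rw [if_pos]
            right
            rw [List.getD_eq_getElem cs 0 h]
            simpa using heq
      · have hdrop : cs.drop i = [] := List.drop_eq_nil_of_le (by omega)
        rw [hdrop, incl.eq_def]
        rw [bLoop]
        simp only [skipLt_of_ge cs x i h]
        rw [if_pos (Or.inl (by omega))]
  
-- merge-scan correctness: on sorted lists, incl tests multiset containment (count-wise)
theorem incl_eq_true_iff (ss cs : List Int)
    (hs : ss.Pairwise (· ≤ ·)) (hc : cs.Pairwise (· ≤ ·)) :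
    incl ss cs = true ↔ ∀ v : Int, ss.count v ≤ cs.count v := by
  induction hn : ss.length + cs.length using Nat.strong_induction_on generalizing ss cs with
  | _ n ih =>
    cases ss with
    | nil => simp [incl]
    | cons x ssr =>
      cases cs with
      | nil =>
        simp only [incl, Bool.false_eq_true, false_iff, not_forall]
        exact ⟨x, by simp⟩
      | cons c csr =>
        have hs' := (List.pairwise_cons.mp hs).2
        have hc' := (List.pairwise_cons.mp hc).2
        by_cases hlt : c < x
        · rw [incl, if_pos hlt]
          rw [ih ((x :: ssr).length + csr.length) (by simp at hn ⊢; omega) (x :: ssr) csr hs hc' rfl]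
          constructor
          · intro h v
            exact Nat.le_trans (h v) List.count_le_count_cons
          · intro h v
            by_cases hvc : v = c
            · subst hvc
              have : (x :: ssr).count v = 0 := by
                rw [List.count_eq_zero]
                intro hv
                rcases List.mem_cons.mp hv with h1 | h1
                · omega
                · have := (List.pairwise_cons.mp hs).1 v h1; omega
              rw [this]; omega
            · have := h v
              rw [List.count_cons_of_ne (Ne.symm hvc)] at this
              exact this
        · rw [incl, if_neg hlt]
          by_cases heq : c = x
          · subst heq
            rw [if_pos rfl]
            rw [ih (ssr.length + csr.length) (by simp at hn ⊢; omega) ssr csr hs' hc' rfl]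
            constructor
            · intro h v
              by_cases hvc : v = c
              · subst hvc
                have := h v
                rw [List.count_cons_self, List.count_cons_self]
                omega
              · rw [List.count_cons_of_ne (Ne.symm hvc), List.count_cons_of_ne (Ne.symm hvc)]
                exact h v
            · intro h v
              have := h v
              by_cases hvc : v = c
              · subst hvc
                rw [List.count_cons_self, List.count_cons_self] at this
                omega
              · rw [List.count_cons_of_ne (Ne.symm hvc), List.count_cons_of_ne (Ne.symm hvc)] at this
                exact this
          · rw [if_neg heq]
            simp only [Bool.false_eq_true, false_iff, not_forall]
            refine ⟨x, ?_⟩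
            have hxgt : x < c := by omega
            have hcnt : (c :: csr).count x = 0 := by
              rw [List.count_eq_zero]
              intro hv
              rcases List.mem_cons.mp hv with h1 | h1
              · omega
              · have := (List.pairwise_cons.mp hc).1 x h1; omega
            rw [hcnt, List.count_cons_self]
            omega

-- ===== VERDICT (by name: the statement is the Claim_ definition above) =====
theorem es_subset_sum_spec : Claim_equal_es_subset_sum := by
  intro conjunto solucion K _
  unfold Spec_es_subset_sum es_subset_sum es_subset_sum_alt
  by_cases hsum : solucion.sum ≠ K
  · simp [hsum]
  · rw [if_neg hsum, if_neg hsum]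
    rw [PySem.Dict.foldl_insert_getD_add_one_eq_counter]
    rw [bLoop_eq_incl _ _ 0 (Nat.zero_le _), List.drop_zero]
    rw [Bool.eq_iff_iff, esLoop_eq_true_iff]
    rw [incl_eq_true_iff _ _
      (by simpa using PySem.List.sorted_pairwise solucion (fun x => x))
      (by simpa using PySem.List.sorted_pairwise conjunto (fun x => x))]
    have hps : ∀ v : Int, (PySem.List.sorted solucion (fun x => x) false).count v = solucion.count v :=
      fun v => (PySem.List.sorted_perm solucion (fun x => x) false).count_eq v
    have hpc : ∀ v : Int, (PySem.List.sorted conjunto (fun x => x) false).count v = conjunto.count v :=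
      fun v => (PySem.List.sorted_perm conjunto (fun x => x) false).count_eq v
    constructor
    · intro h v
      rw [hps, hpc]
      by_cases hv : v ∈ solucion
      · have h2 := (h v hv).2
        rw [PySem.Dict.getD_counter] at h2
        exact_mod_cast h2
      · rw [List.count_eq_zero_of_not_mem hv]; omega
    · intro h v hv
      have hle : solucion.count v ≤ conjunto.count v := by
        have := h v; rwa [hps, hpc] at this
      have hpos : 0 < solucion.count v := List.count_pos_iff.mpr hv
      refine ⟨List.count_pos_iff.mp (Nat.lt_of_lt_of_le hpos hle), ?_⟩
      rw [PySem.Dict.getD_counter]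
      exact_mod_cast hle
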